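-- pv_equiv track=rewrite | github.com/MediaMonitoringAndAnalysis/EntryExtraction | setfit_extraction.py | _transform_sublists
-- ===== SOURCE A (Python) =====
-- from typing import List, Tuple
--
-- def _transform_sublists(input_sublists: List[List[int]]) -> List[List[int]]:
--     flattened_list = [item for sublist in input_sublists for item in sublist]
--     result = []
--     current_group = []
--
--     for index, value in enumerate(flattened_list):
--         if value == 1:  # Start a new group if we encounter a 1
--             if (
--                 current_group
--             ):  # Add the previous group to the result if it's not empty
--                 result.append(current_group)
--             current_group = [index]
--         else:
--             current_group.append(index)  # Add the index to the current group
--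
--     if current_group:  # Add the last group if it exists
--         result.append(current_group)
--
--     return result
-- ===== SOURCE B (Python) =====
-- from typing import List
--
--
-- def _transform_sublists(input_sublists: List[List[int]]) -> List[List[int]]:
--     # Boundary decomposition: compute the group start positions first, then
--     # materialize each group as a contiguous index range between boundaries.
--     flat = [item for sublist in input_sublists for item in sublist]
--     starts = [i for i, v in enumerate(flat) if i == 0 or v == 1]
--     bounds = starts + [len(flat)]
--     return [list(range(a, b)) for a, b in zip(bounds, bounds[1:])]
-- ===== Notes on version B (the rewrite author's own statement) =====
-- stated objective: alternative
-- what changed: Replaces A's single accumulate-and-close pass (mutable current group appended element by element) by a boundary decomposition: first collect the group start indices, then emit the index range between each pair of consecutive boundaries.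
import Mathlib
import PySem

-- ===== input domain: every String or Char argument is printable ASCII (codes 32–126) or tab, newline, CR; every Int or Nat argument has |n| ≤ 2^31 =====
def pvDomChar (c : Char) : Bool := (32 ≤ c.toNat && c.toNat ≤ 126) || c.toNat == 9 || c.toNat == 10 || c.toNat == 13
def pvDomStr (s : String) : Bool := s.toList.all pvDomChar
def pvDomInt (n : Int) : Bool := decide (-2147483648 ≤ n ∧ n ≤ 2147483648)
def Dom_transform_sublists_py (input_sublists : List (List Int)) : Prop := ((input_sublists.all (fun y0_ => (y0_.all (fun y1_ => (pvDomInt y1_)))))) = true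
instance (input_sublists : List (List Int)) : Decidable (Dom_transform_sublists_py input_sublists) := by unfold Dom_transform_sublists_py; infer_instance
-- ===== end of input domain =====

-- B replaces A's single accumulate-and-close pass by a boundary decomposition
-- (collect group start indices, then emit the index range between consecutive
-- boundaries); objective: alternative decomposition, same cost.

-- ===== PORT A =====

-- one step of A's loop body: state = (result, current_group), p = (index, value)
def tsStepA (s : List (List Int) × List Int) (p : Int × Int) : List (List Int) × List Int :=
  if p.2 = 1 then
    ((if s.2 ≠ [] then s.1 ++ [s.2] else s.1), [p.1])
  else
    (s.1, s.2 ++ [p.1])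

def transform_sublists_py (input_sublists : List (List Int)) : List (List Int) :=
  let flattened_list := input_sublists.flatMap id
  let st := (PySem.List.enumerate flattened_list 0).foldl tsStepA ([], [])
  if st.2 ≠ [] then st.1 ++ [st.2] else st.1

-- ===== PORT B =====

def transform_sublists_py_alt (input_sublists : List (List Int)) : List (List Int) :=
  let flat := input_sublists.flatMap id
  let starts := ((PySem.List.enumerate flat 0).filter (fun p => p.1 == 0 || p.2 == 1)).map (·.1)
  let bounds := starts ++ [(flat.length : Int)]
  -- Python's 'zip(bounds, bounds[1:])': the slice [1:] of a list is 'drop 1' (nonnegative start, exact)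
  (bounds.zip (bounds.drop 1)).map (fun p => PySem.List.pyRange p.1 p.2 1)

-- ===== PRECONDITION & SPEC =====
def Spec_transform_sublists_py (input_sublists : List (List Int)) (out : List (List Int)) : Prop := out = transform_sublists_py_alt input_sublists
instance (input_sublists : List (List Int)) (out : List (List Int)) : Decidable (Spec_transform_sublists_py input_sublists out) := by unfold Spec_transform_sublists_py; infer_instance

-- ===== CLAIM (what is proved, stated in full; the proofs are below) =====
def Claim_equal_transform_sublists_py : Prop := ∀ (input_sublists : List (List Int)), Dom_transform_sublists_py input_sublists → Spec_transform_sublists_py input_sublists (transform_sublists_py input_sublists)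

-- ===== LEMMAS AND PROOFS =====

-- abbreviations used only by the proofs
def tsStarts (vals : List Int) : List Int :=
  ((PySem.List.enumerate vals 0).filter (fun p => p.1 == 0 || p.2 == 1)).map (·.1)

def tsPairs (l : List Int) : List (Int × Int) := l.zip (l.drop 1)

def tsB (vals : List Int) : List (List Int) :=
  ((tsStarts vals ++ [(vals.length : Int)]).zip ((tsStarts vals ++ [(vals.length : Int)]).drop 1)).map
    (fun p => PySem.List.pyRange p.1 p.2 1)

lemma tsPairs_cons (a : Int) (h : Int) (t : List Int) :
    tsPairs (a :: h :: t) = (a, h) :: tsPairs (h :: t) := by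
  simp [tsPairs]

lemma tsPairs_snoc_snoc (rest : List Int) (s b : Int) :
    tsPairs (rest ++ [s] ++ [b]) = tsPairs (rest ++ [s]) ++ [(s, b)] := by
  induction rest with
  | nil => simp [tsPairs]
  | cons a t ih =>
    cases t with
    | nil => simp [tsPairs]
    | cons a' t' =>
      have := ih
      simp only [List.cons_append] at *
      rw [tsPairs_cons, tsPairs_cons, this]
      simp

lemma tsStarts_snoc (vals : List Int) (x : Int) :
    tsStarts (vals ++ [x]) =
      tsStarts vals ++ (if vals.length = 0 ∨ x = 1 then [(vals.length : Int)] else []) := by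
  unfold tsStarts
  rw [PySem.List.enumerate_append]
  simp only [List.filter_append, List.map_append]
  congr 1
  by_cases h1 : vals.length = 0 <;> by_cases h2 : x = 1 <;>
    simp [PySem.List.enumerate_cons, PySem.List.enumerate_nil,
      h1, h2, Int.natCast_eq_zero]

-- the loop invariant of A's fold, phrased against B's boundary data
lemma tsInv (vals : List Int) (hne : vals ≠ []) :
    ∃ rest s, tsStarts vals = rest ++ [s] ∧ 0 ≤ s ∧ s < (vals.length : Int) ∧
      (PySem.List.enumerate vals 0).foldl tsStepA ([], []) =
        ((tsPairs (rest ++ [s])).map (fun p => PySem.List.pyRange p.1 p.2 1),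
          PySem.List.pyRange s (vals.length : Int) 1) := by
  induction vals using List.reverseRecOn with
  | nil => exact absurd rfl hne
  | append_singleton vals x ih =>
    rcases List.eq_nil_or_concat' vals with rfl | h
    · refine ⟨[], 0, ?_, by norm_num, by norm_num, ?_⟩
      · unfold tsStarts
        simp [PySem.List.enumerate_cons, PySem.List.enumerate_nil, List.filter]
      · by_cases hx : x = 1 <;>
          simp [PySem.List.enumerate_cons, PySem.List.enumerate_nil, tsStepA, tsPairs, hx] <;>
          decide
    · have hvne : vals ≠ [] := by rcases h with ⟨_, _, rfl⟩; simp
      obtain ⟨rest, s, hst, hs0, hsn, hfold⟩ := ih hvne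
      have hlen : vals.length ≠ 0 := by simpa [List.length_eq_zero_iff] using hvne
      have henum : PySem.List.enumerate (vals ++ [x]) 0 =
          PySem.List.enumerate vals 0 ++ [((vals.length : Int), x)] := by
        rw [PySem.List.enumerate_append]
        simp [PySem.List.enumerate_cons, PySem.List.enumerate_nil]
      have hrange_ne : PySem.List.pyRange s (vals.length : Int) 1 ≠ [] := by
        have : s ∈ PySem.List.pyRange s (vals.length : Int) 1 := by
          rw [PySem.List.mem_pyRange_one]; exact ⟨le_refl _, hsn⟩
        intro hnil; rw [hnil] at this; exact absurd this (List.not_mem_nil)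
      by_cases hx : x = 1
      · refine ⟨rest ++ [s], (vals.length : Int), ?_, by positivity,
          by simp [List.length_append], ?_⟩
        · rw [tsStarts_snoc, hst]; simp [hx]
        · rw [henum, List.foldl_append, hfold]
          simp only [List.foldl_cons, List.foldl_nil, tsStepA, hx]
          rw [tsPairs_snoc_snoc]
          simp [hrange_ne, PySem.List.pyRange_one_singleton]
      · refine ⟨rest, s, ?_, hs0, by simp [List.length_append]; omega, ?_⟩
        · rw [tsStarts_snoc, hst]; simp [hx, hlen]
        · rw [henum, List.foldl_append, hfold]
          simp only [List.foldl_cons, List.foldl_nil, tsStepA, hx]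
          have h2 : PySem.List.pyRange s (vals.length : Int) 1 ++ [(vals.length : Int)] =
              PySem.List.pyRange s ((vals.length : Int) + 1) 1 := by
            rw [PySem.List.pyRange_one_succ_right (le_of_lt hsn)]
          simp [h2]

lemma tsMain (vals : List Int) :
    (if ((PySem.List.enumerate vals 0).foldl tsStepA ([], [])).2 ≠ [] then
        ((PySem.List.enumerate vals 0).foldl tsStepA ([], [])).1 ++
          [((PySem.List.enumerate vals 0).foldl tsStepA ([], [])).2]
      else ((PySem.List.enumerate vals 0).foldl tsStepA ([], [])).1) = tsB vals := by
  rcases List.eq_nil_or_concat' vals with rfl | h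
  · simp [PySem.List.enumerate_nil, tsB, tsStarts]
  · have hne : vals ≠ [] := by rcases h with ⟨_, _, rfl⟩; simp
    obtain ⟨rest, s, hst, hs0, hsn, hfold⟩ := tsInv vals hne
    have hrange_ne : PySem.List.pyRange s (vals.length : Int) 1 ≠ [] := by
      have : s ∈ PySem.List.pyRange s (vals.length : Int) 1 := by
        rw [PySem.List.mem_pyRange_one]; exact ⟨le_refl _, hsn⟩
      intro hnil; rw [hnil] at this; exact absurd this (List.not_mem_nil)
    rw [hfold]
    simp only [hrange_ne, ne_eq, not_false_iff, if_pos]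
    unfold tsB
    rw [hst, ← tsPairs, tsPairs_snoc_snoc]
    simp

-- ===== VERDICT (by name: the statement is the Claim_ definition above) =====
theorem transform_sublists_py_spec : Claim_equal_transform_sublists_py := by
  intro input_sublists _
  unfold Spec_transform_sublists_py transform_sublists_py transform_sublists_py_alt
  have := tsMain (input_sublists.flatMap id)
  simpa [tsB, tsStarts] using this
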